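-- pv_equiv track=rewrite | github.com/chingfhen/Financial-Aspect-Based-Sentiment-Analysis | eda.py | get_augmented_sample
-- ===== SOURCE A (Python) =====
-- def get_augmented_sample(aug_words, labels, aspects, aspect_identifier):
--
--     aspect_index = 0
--     new_labels = []
--     for i,word in enumerate(aug_words):
--         if word == aspect_identifier:
--             aspect_len = len(aspects[aspect_index])
--             pre_length = len(" ".join(aug_words[:i]))+1 if i>0 else len(" ".join(aug_words[:i]))
--             aug_words[i] = aspects[aspect_index]            # add back original aspect word
--             new_labels.append([pre_length,pre_length+aspect_len,labels[aspect_index][2]]) # get new labels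
--             aspect_index+=1
--     aug_sentence = " ".join(aug_words)
--     return aug_sentence, new_labels
-- ===== SOURCE B (Python) =====
-- # B: single pass with a running character-offset counter instead of re-joining the
-- # mutated prefix at every aspect match (objective: alternative one-pass formulation).
-- # Note: A mutates aug_words in place; B does not — the equivalence is about the return value.
-- def get_augmented_sample(aug_words, labels, aspects, aspect_identifier):
--     out_words = []
--     new_labels = []
--     offset = 0
--     aspect_index = 0
--     for word in aug_words:
--         if word == aspect_identifier:
--             word = aspects[aspect_index]
--             new_labels.append([offset, offset + len(word), labels[aspect_index][2]])
--             aspect_index += 1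
--         out_words.append(word)
--         offset += len(word) + 1
--     return " ".join(out_words), new_labels
-- ===== Notes on version B (the rewrite author's own statement) =====
-- stated objective: alternative
-- what changed: B keeps a running character-offset counter and builds the output word list in one pass, instead of re-joining the whole mutated prefix with ' '.join at every aspect match as A does; it trades A's per-match prefix re-join for per-word bookkeeping.
import Mathlib
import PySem

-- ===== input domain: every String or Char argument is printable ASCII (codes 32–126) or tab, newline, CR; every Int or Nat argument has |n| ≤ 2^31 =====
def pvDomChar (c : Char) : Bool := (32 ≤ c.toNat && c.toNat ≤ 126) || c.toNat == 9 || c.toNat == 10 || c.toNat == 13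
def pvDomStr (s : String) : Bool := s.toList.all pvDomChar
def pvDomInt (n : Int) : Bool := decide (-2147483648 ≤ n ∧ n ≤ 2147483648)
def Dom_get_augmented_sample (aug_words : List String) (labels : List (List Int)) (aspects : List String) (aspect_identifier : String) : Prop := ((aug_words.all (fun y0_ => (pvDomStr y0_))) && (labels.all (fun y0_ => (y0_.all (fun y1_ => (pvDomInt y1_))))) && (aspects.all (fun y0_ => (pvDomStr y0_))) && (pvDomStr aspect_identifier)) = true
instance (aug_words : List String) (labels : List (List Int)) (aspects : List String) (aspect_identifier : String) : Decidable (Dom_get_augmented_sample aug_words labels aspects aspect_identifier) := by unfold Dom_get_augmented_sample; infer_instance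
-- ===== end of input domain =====

-- B replaces A's per-match re-join of the whole prefix by a running character-offset
-- counter kept across one pass (objective: alternative). A mutates aug_words in place;
-- the equivalence proved here is about the return value only.

-- ===== PORT A =====
-- A's loop: `pre` is aug_words[:i] after the in-place replacements, `rest` the untouched
-- suffix; pre_length re-joins the whole prefix at every match, exactly as A does.
def getAugLoopA (aspects : List String) (labels : List (List Int)) (ident : String) :
    List String → List String → Nat → List (List Int) → List String × List (List Int)
  | pre, [], _, acc => (pre, acc)
  | pre, word :: rest, ai, acc =>
    if word == ident then
      let asp := aspects.getD ai ""          -- aspects[aspect_index]; Pre_ keeps ai in range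
      let aspect_len : Int := PySem.Str.len asp
      let pre_length : Int :=
        if 0 < pre.length then PySem.Str.len (PySem.Str.join " " pre) + 1
        else PySem.Str.len (PySem.Str.join " " pre)
      getAugLoopA aspects labels ident (pre ++ [asp]) rest (ai + 1)
        (acc ++ [[pre_length, pre_length + aspect_len, (labels.getD ai []).getD 2 0]])
    else
      getAugLoopA aspects labels ident (pre ++ [word]) rest ai acc

def get_augmented_sample (aug_words : List String) (labels : List (List Int)) (aspects : List String) (aspect_identifier : String) : String × List (List Int) :=
  let r := getAugLoopA aspects labels aspect_identifier [] aug_words 0 []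
  (PySem.Str.join " " r.1, r.2)

-- ===== PORT B =====
-- one fold: (out_words reversed, new_labels reversed, running offset, aspect_index)
def getAugStepB (aspects : List String) (labels : List (List Int)) (ident : String)
    (st : List String × List (List Int) × Int × Nat) (word : String) :
    List String × List (List Int) × Int × Nat :=
  let (out_words, new_labels, offset, ai) := st
  if word == ident then
    let w := aspects.getD ai ""
    (w :: out_words,
     [offset, offset + PySem.Str.len w, (labels.getD ai []).getD 2 0] :: new_labels,
     offset + PySem.Str.len w + 1, ai + 1)
  else
    (word :: out_words, new_labels, offset + PySem.Str.len word + 1, ai)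

def get_augmented_sample_alt (aug_words : List String) (labels : List (List Int)) (aspects : List String) (aspect_identifier : String) : String × List (List Int) :=
  let st := aug_words.foldl (getAugStepB aspects labels aspect_identifier) ([], [], 0, 0)
  (PySem.Str.join " " st.1.reverse, st.2.1.reverse)

-- ===== PRECONDITION & SPEC =====
-- Pre_ excludes exactly the inputs where Python A raises an IndexError: more occurrences
-- of aspect_identifier than aspects/labels entries, or a consumed labels row shorter than 3.
def Pre_get_augmented_sample (aug_words : List String) (labels : List (List Int)) (aspects : List String) (aspect_identifier : String) : Prop :=
  aug_words.count aspect_identifier ≤ aspects.length ∧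
  aug_words.count aspect_identifier ≤ labels.length ∧
  ∀ l ∈ labels.take (aug_words.count aspect_identifier), 3 ≤ l.length

instance (aug_words : List String) (labels : List (List Int)) (aspects : List String) (aspect_identifier : String) : Decidable (Pre_get_augmented_sample aug_words labels aspects aspect_identifier) := by unfold Pre_get_augmented_sample; infer_instance

def pvWitness_get_augmented_sample : List String × List (List Int) × List String × String :=
  (["the", "$T$", "was", "great"], [[4, 7, 1]], ["food"], "$T$")

def Spec_get_augmented_sample (aug_words : List String) (labels : List (List Int)) (aspects : List String) (aspect_identifier : String) (out : String × List (List Int)) : Prop := out = get_augmented_sample_alt aug_words labels aspects aspect_identifier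
instance (aug_words : List String) (labels : List (List Int)) (aspects : List String) (aspect_identifier : String) (out : String × List (List Int)) : Decidable (Spec_get_augmented_sample aug_words labels aspects aspect_identifier out) := by unfold Spec_get_augmented_sample; infer_instance

-- ===== CLAIM =====
def Claim_equal_get_augmented_sample : Prop := ∀ (aug_words : List String) (labels : List (List Int)) (aspects : List String) (aspect_identifier : String), Dom_get_augmented_sample aug_words labels aspects aspect_identifier → Pre_get_augmented_sample aug_words labels aspects aspect_identifier → Spec_get_augmented_sample aug_words labels aspects aspect_identifier (get_augmented_sample aug_words labels aspects aspect_identifier)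

-- ===== LEMMAS AND PROOFS =====
-- B's running offset after emitting `ws` equals the sum of (len w + 1) over ws
def pvOffI (ws : List String) : Int := (ws.map (fun w => PySem.Str.len w + 1)).sum
lemma pvOffI_append (ws : List String) (w : String) :
    pvOffI (ws ++ [w]) = pvOffI ws + (PySem.Str.len w + 1) := by
  simp [pvOffI]
lemma pvJoin_len_cons (w : String) (pre : List String) :
    PySem.Str.len (PySem.Str.join " " (w :: pre)) + 1 = pvOffI (w :: pre) := by
  induction pre generalizing w with
  | nil =>
      simp [pvOffI, PySem.Str.len_eq, PySem.Str.toList_join, PySem.Chars.join_singleton]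
  | cons y rest ih =>
      have h := ih y
      simp [pvOffI, PySem.Chars.join_cons_cons] at h ⊢
      omega
lemma pvPreLen (pre : List String) :
    (if 0 < pre.length then PySem.Str.len (PySem.Str.join " " pre) + 1
     else PySem.Str.len (PySem.Str.join " " pre)) = pvOffI pre := by
  cases pre with
  | nil => simp [pvOffI, PySem.Str.len_eq, PySem.Str.toList_join, PySem.Chars.join_nil]
  | cons w rest => simpa using pvJoin_len_cons w rest
lemma pvLoop_eq (aspects : List String) (labels : List (List Int)) (ident : String)
    (rest : List String) : ∀ (pre : List String) (acc : List (List Int)) (ai : Nat),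
    ∃ off' ai',
      rest.foldl (getAugStepB aspects labels ident) (pre.reverse, acc.reverse, pvOffI pre, ai)
        = ((getAugLoopA aspects labels ident pre rest ai acc).1.reverse,
           (getAugLoopA aspects labels ident pre rest ai acc).2.reverse, off', ai') := by
  induction rest with
  | nil =>
      intro pre acc ai
      exact ⟨pvOffI pre, ai, by simp [getAugLoopA]⟩
  | cons word rest ih =>
      intro pre acc ai
      by_cases h : (word == ident) = true
      · have hpre := pvPreLen pre
        obtain ⟨off', ai', hstep⟩ :=
          ih (pre ++ [aspects.getD ai ""])
             (acc ++ [[pvOffI pre, pvOffI pre + PySem.Str.len (aspects.getD ai ""),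
                       (labels.getD ai []).getD 2 0]]) (ai + 1)
        refine ⟨off', ai', ?_⟩
        rw [List.foldl_cons]
        show rest.foldl (getAugStepB aspects labels ident)
            (getAugStepB aspects labels ident (pre.reverse, acc.reverse, pvOffI pre, ai) word) = _
        rw [show getAugStepB aspects labels ident (pre.reverse, acc.reverse, pvOffI pre, ai) word
            = ((pre ++ [aspects.getD ai ""]).reverse,
               (acc ++ [[pvOffI pre, pvOffI pre + PySem.Str.len (aspects.getD ai ""),
                         (labels.getD ai []).getD 2 0]]).reverse,
               pvOffI (pre ++ [aspects.getD ai ""]), ai + 1) by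
          simp [getAugStepB, h, pvOffI_append]; ring]
        rw [hstep]
        rw [show getAugLoopA aspects labels ident pre (word :: rest) ai acc
            = getAugLoopA aspects labels ident (pre ++ [aspects.getD ai ""]) rest (ai + 1)
                (acc ++ [[pvOffI pre, pvOffI pre + PySem.Str.len (aspects.getD ai ""),
                          (labels.getD ai []).getD 2 0]]) by
          simp only [getAugLoopA, h, if_true, hpre]]
      · obtain ⟨off', ai', hstep⟩ := ih (pre ++ [word]) acc ai
        refine ⟨off', ai', ?_⟩
        rw [List.foldl_cons]
        rw [show getAugStepB aspects labels ident (pre.reverse, acc.reverse, pvOffI pre, ai) word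
            = ((pre ++ [word]).reverse, acc.reverse, pvOffI (pre ++ [word]), ai) by
          simp [getAugStepB, h, pvOffI_append]; ring]
        rw [hstep]
        rw [show getAugLoopA aspects labels ident pre (word :: rest) ai acc
            = getAugLoopA aspects labels ident (pre ++ [word]) rest ai acc by
          simp [getAugLoopA, h]]

-- ===== VERDICT =====
theorem get_augmented_sample_spec : Claim_equal_get_augmented_sample := by
  unfold Claim_equal_get_augmented_sample
  intro aug_words labels aspects ident _ _
  unfold Spec_get_augmented_sample get_augmented_sample get_augmented_sample_alt
  obtain ⟨off', ai', h⟩ := pvLoop_eq aspects labels ident aug_words [] [] 0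
  simp only [List.reverse_nil, show pvOffI ([] : List String) = 0 by simp [pvOffI]] at h
  simp [h]
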